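-- pv_equiv track=rewrite | github.com/ml4tp/gamepad | gamepad/lib/myutil.py | merge_hists
-- ===== SOURCE A (Python) =====
-- def merge_hist(dict1, dict2):
--     d = dict([(k, v) for k, v in dict1.items()])
--     for k, v in dict2.items():
--         if k in d:
--             d[k] += v
--         else:
--             d[k] = v
--     return d
--
-- def merge_hists(dicts):
--     if len(dicts) <= 0:
--         return {}
--     elif len(dicts) == 1:
--         return dict([(k, v) for k, v in dicts[0].items()])
--     else:
--         d = dicts[0]
--         dicts = dicts[1:]
--         for d2 in dicts:
--             d = merge_hist(d, d2)
--         return d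
-- ===== SOURCE B (Python) =====
-- def merge_hists(dicts):
--     out = {}
--     for d in dicts:
--         for k, v in d.items():
--             out[k] = out.get(k, 0) + v
--     return out
-- ===== Notes on version B (the rewrite author's own statement) =====
-- stated objective: faster
-- what changed: B accumulates all entries of all dicts into one dict in a single pass with out.get(k,0)+v, instead of A's left fold that rebuilds a fresh copy of the whole accumulator dict at every pairwise merge_hist step.
import Mathlib
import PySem

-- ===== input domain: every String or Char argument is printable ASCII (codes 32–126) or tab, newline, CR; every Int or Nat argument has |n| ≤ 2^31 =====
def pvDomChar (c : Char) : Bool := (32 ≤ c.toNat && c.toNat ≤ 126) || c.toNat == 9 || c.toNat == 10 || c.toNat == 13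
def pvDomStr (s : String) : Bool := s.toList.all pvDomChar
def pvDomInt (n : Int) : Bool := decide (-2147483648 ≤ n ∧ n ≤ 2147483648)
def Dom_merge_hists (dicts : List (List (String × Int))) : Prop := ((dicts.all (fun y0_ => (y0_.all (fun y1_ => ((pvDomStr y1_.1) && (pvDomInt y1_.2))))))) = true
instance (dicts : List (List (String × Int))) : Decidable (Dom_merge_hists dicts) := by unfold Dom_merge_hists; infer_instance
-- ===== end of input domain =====

-- ===== PORT A =====
-- B replaces A's repeated pairwise merge (which copies the whole accumulator dict
-- at every step) by one single-pass accumulation into a single dict.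
-- Inner lists model Python dicts: each is read through PySem.Dict.ofList in both ports.
def merge_hist (dict1 dict2 : PySem.Dict String Int) : PySem.Dict String Int :=
  -- d = dict([(k, v) for k, v in dict1.items()])
  let d := PySem.Dict.ofList (dict1.items.map (fun p => (p.1, p.2)))
  -- for k, v in dict2.items(): if k in d: d[k] += v else: d[k] = v
  dict2.items.foldl (fun d p =>
    if d.contains p.1 then d.modify p.1 0 (· + p.2) else d.insert p.1 p.2) d

def merge_hists (dicts : List (List (String × Int))) : List (String × Int) :=
  let ds := dicts.map PySem.Dict.ofList
  match ds with
  | [] => []                                   -- len(dicts) <= 0: return {}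
  | [d0] =>                                    -- len(dicts) == 1: copy of dicts[0]
    (PySem.Dict.ofList (d0.items.map (fun p => (p.1, p.2)))).items
  | d0 :: rest =>                              -- d = dicts[0]; for d2 in dicts[1:]: d = merge_hist(d, d2)
    (rest.foldl merge_hist d0).items

-- ===== PORT B =====
def merge_hists_alt (dicts : List (List (String × Int))) : List (String × Int) :=
  -- out = {}; for d in dicts: for k, v in d.items(): out[k] = out.get(k, 0) + v
  (dicts.foldl (fun out d =>
      (PySem.Dict.ofList d).items.foldl
        (fun out p => out.insert p.1 (out.getD p.1 0 + p.2)) out)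
    PySem.Dict.empty).items

-- ===== PRECONDITION & SPEC =====
def Spec_merge_hists (dicts : List (List (String × Int))) (out : List (String × Int)) : Prop := out = merge_hists_alt dicts
instance (dicts : List (List (String × Int))) (out : List (String × Int)) : Decidable (Spec_merge_hists dicts out) := by unfold Spec_merge_hists; infer_instance

-- ===== CLAIM (what is proved, stated in full; the proofs are below) =====
def Claim_equal_merge_hists : Prop := ∀ (dicts : List (List (String × Int))), Dom_merge_hists dicts → Spec_merge_hists dicts (merge_hists dicts)

-- ===== LEMMAS AND PROOFS =====

-- B's accumulation step, written out (the lambda in merge_hists_alt).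
theorem pv_stepAB (d : PySem.Dict String Int) (p : String × Int) :
    (if d.contains p.1 then d.modify p.1 0 (· + p.2) else d.insert p.1 p.2)
      = d.insert p.1 (d.getD p.1 0 + p.2) := by
  by_cases h : d.contains p.1 = true
  · simp [h, PySem.Dict.modify]
  · simp only [Bool.not_eq_true] at h
    have h0 : d.getD p.1 0 = 0 := PySem.Dict.getD_of_not_contains d 0 h
    simp [h, h0]

theorem pv_fold_eq (l : List (String × Int)) (d : PySem.Dict String Int) :
    l.foldl (fun d p =>
        if d.contains p.1 then d.modify p.1 0 (· + p.2) else d.insert p.1 p.2) d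
      = l.foldl (fun out p => out.insert p.1 (out.getD p.1 0 + p.2)) d := by
  simp only [pv_stepAB]

theorem pv_ofList_items (l : List (String × Int)) (h : (l.map Prod.fst).Nodup) :
    (PySem.Dict.ofList l).items = l := by
  have := PySem.Dict.items_foldl_insert_fresh l Prod.fst Prod.snd
    (PySem.Dict.empty (κ := String) (ν := Int))
    (by intro a _; simp) h
  simpa [PySem.Dict.ofList, PySem.Dict.update] using this

theorem pv_ofList_items_self (d : PySem.Dict String Int) (h : d.keys.Nodup) :
    PySem.Dict.ofList d.items = d := by
  apply PySem.Dict.ext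
  exact pv_ofList_items d.items h

theorem pv_map_self (l : List (String × Int)) : l.map (fun p => (p.1, p.2)) = l := by
  simp

theorem pv_merge_hist_eq (d1 d2 : PySem.Dict String Int) (h : d1.keys.Nodup) :
    merge_hist d1 d2
      = d2.items.foldl (fun out p => out.insert p.1 (out.getD p.1 0 + p.2)) d1 := by
  unfold merge_hist
  rw [pv_map_self, pv_ofList_items_self d1 h, pv_fold_eq]

theorem pv_nodup_step (l : List (String × Int)) (d : PySem.Dict String Int)
    (h : d.keys.Nodup) :
    (l.foldl (fun out p => out.insert p.1 (out.getD p.1 0 + p.2)) d).keys.Nodup :=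
  PySem.Dict.nodup_keys_foldl_insert_key l Prod.fst
    (fun out p => out.getD p.1 0 + p.2) d h

-- Under fresh, duplicate-free keys B's step is a plain insert.
theorem pv_fresh_fold (l : List (String × Int)) (d : PySem.Dict String Int)
    (hl : (l.map Prod.fst).Nodup) (hd : ∀ p ∈ l, d.contains p.1 = false) :
    l.foldl (fun out p => out.insert p.1 (out.getD p.1 0 + p.2)) d
      = l.foldl (fun out p => out.insert p.1 p.2) d := by
  induction l generalizing d with
  | nil => rfl
  | cons p l ih =>
    simp only [List.map_cons, List.nodup_cons, List.mem_map] at hl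
    have hc : d.contains p.1 = false := hd p (List.mem_cons_self)
    have h0 : d.getD p.1 0 = 0 := PySem.Dict.getD_of_not_contains d 0 hc
    simp only [List.foldl_cons, h0, zero_add]
    refine ih _ hl.2 ?_
    intro q hq
    rw [PySem.Dict.contains_insert]
    have hne : q.1 ≠ p.1 := fun e => hl.1 ⟨q, hq, e⟩
    simp [hne, hd q (List.mem_cons_of_mem _ hq)]

-- B's fold over the duplicate-free item list of a dict, from empty, rebuilds that dict.
theorem pv_first_fold (d0 : PySem.Dict String Int) (h : d0.keys.Nodup) :
    (d0.items.foldl (fun out p => out.insert p.1 (out.getD p.1 0 + p.2))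
        (PySem.Dict.empty (κ := String) (ν := Int)))
      = PySem.Dict.ofList d0.items := by
  rw [pv_fresh_fold _ _ ?_ ?_]
  · rfl
  · exact h
  · intro p _; simp

theorem pv_main_fold (ls : List (List (String × Int))) (d : PySem.Dict String Int)
    (h : d.keys.Nodup) :
    ls.foldl (fun d l => merge_hist d (PySem.Dict.ofList l)) d
      = ls.foldl (fun out l =>
          (PySem.Dict.ofList l).items.foldl
            (fun out p => out.insert p.1 (out.getD p.1 0 + p.2)) out) d := by
  induction ls generalizing d with
  | nil => rfl
  | cons l ls ih =>
    simp only [List.foldl_cons]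
    rw [pv_merge_hist_eq d (PySem.Dict.ofList l) h, ih _ (pv_nodup_step _ _ h)]

-- ===== VERDICT (by name: the statement is the Claim_ definition above) =====
theorem merge_hists_spec : Claim_equal_merge_hists := by
  intro dicts _
  unfold Spec_merge_hists merge_hists merge_hists_alt
  match dicts with
  | [] => rfl
  | [l0] =>
    simp only [List.map, List.foldl_cons, List.foldl_nil]
    rw [pv_map_self, pv_ofList_items_self _ (PySem.Dict.nodup_keys_ofList l0),
      pv_first_fold (PySem.Dict.ofList l0) (PySem.Dict.nodup_keys_ofList l0),
      pv_ofList_items_self _ (PySem.Dict.nodup_keys_ofList l0)]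
  | l0 :: l1 :: rest =>
    show (List.foldl merge_hist (PySem.Dict.ofList l0) ((l1 :: rest).map PySem.Dict.ofList)).items
        = (List.foldl (fun out d => (PySem.Dict.ofList d).items.foldl
              (fun out p => out.insert p.1 (out.getD p.1 0 + p.2)) out)
            ((PySem.Dict.ofList l0).items.foldl
              (fun out p => out.insert p.1 (out.getD p.1 0 + p.2)) PySem.Dict.empty)
            (l1 :: rest)).items
    rw [pv_first_fold (PySem.Dict.ofList l0) (PySem.Dict.nodup_keys_ofList l0),
      pv_ofList_items_self _ (PySem.Dict.nodup_keys_ofList l0),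
      List.foldl_map,
      pv_main_fold _ _ (PySem.Dict.nodup_keys_ofList l0)]
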